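-- pv_equiv track=rewrite | github.com/ProgramFan/bentoo | bentoo/common/helpers.py | make_virtual_topology
-- ===== SOURCE A (Python) =====
-- def make_virtual_topology(numa_nodes, cpu_cores, nprocs, nthreads):
--     # First flatten threads into tasks and flatten all cores into a core list.
--     # Then map task to core round-robinly. Finally we compute the numa nodes
--     # and cpu cores of the procs.
--     tasks = range(nprocs * nthreads)
--     task_to_proc = [t // nthreads for t in tasks]
--     cores = []
--     for numa_node_id in numa_nodes:
--         cores.extend(cpu_cores[numa_node_id])
--     task_to_core = [cores[t % len(cores)] for t in tasks]
--     core_to_numa_node = dict()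
--     for k, v in cpu_cores.items():
--         for c in v:
--             core_to_numa_node[c] = k
--     proc_numa_nodes = {p: [] for p in range(nprocs)}
--     proc_cores = {p: [] for p in range(nprocs)}
--     for t in tasks:
--         task_proc_id = task_to_proc[t]
--         task_core_id = task_to_core[t]
--         proc_numa_nodes[task_proc_id].append(core_to_numa_node[task_core_id])
--         proc_cores[task_proc_id].append(task_core_id)
--     result = []
--     for p in range(nprocs):
--         my_numa_nodes = sorted(list(set(proc_numa_nodes[p])))
--         my_cores = sorted(proc_cores[p])
--         my_topo = {n: [] for n in my_numa_nodes}
--         for c in my_cores: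
--             my_topo[core_to_numa_node[c]].append(c)
--         for k, v in my_topo.items():
--             my_topo[k] = sorted(list(set(v)))
--         result.append(list((n, my_topo[n]) for n in my_numa_nodes))
--     return result
-- ===== SOURCE B (Python) =====
-- def make_virtual_topology(numa_nodes, cpu_cores, nprocs, nthreads):
--     # Per-proc direct computation: no global task arrays, no scatter/gather dicts.
--     cores = [c for n in numa_nodes for c in cpu_cores[n]]
--     core_to_numa = {c: k for k, v in cpu_cores.items() for c in v}
--     result = []
--     for p in range(nprocs):
--         topo = {}
--         for t in range(p * nthreads, (p + 1) * nthreads):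
--             c = cores[t % len(cores)]
--             topo.setdefault(core_to_numa[c], set()).add(c)
--         result.append([(n, sorted(topo[n])) for n in sorted(topo)])
--     return result
-- ===== Notes on version B (the rewrite author's own statement) =====
-- stated objective: simpler
-- what changed: B drops A's global task_to_proc/task_to_core arrays and the scatter-into-per-proc-dicts pass: it loops directly over each proc's own task range, grouping that proc's cores by numa node into one small dict, then emits the sorted nodes with their sorted core sets.
import Mathlib
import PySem

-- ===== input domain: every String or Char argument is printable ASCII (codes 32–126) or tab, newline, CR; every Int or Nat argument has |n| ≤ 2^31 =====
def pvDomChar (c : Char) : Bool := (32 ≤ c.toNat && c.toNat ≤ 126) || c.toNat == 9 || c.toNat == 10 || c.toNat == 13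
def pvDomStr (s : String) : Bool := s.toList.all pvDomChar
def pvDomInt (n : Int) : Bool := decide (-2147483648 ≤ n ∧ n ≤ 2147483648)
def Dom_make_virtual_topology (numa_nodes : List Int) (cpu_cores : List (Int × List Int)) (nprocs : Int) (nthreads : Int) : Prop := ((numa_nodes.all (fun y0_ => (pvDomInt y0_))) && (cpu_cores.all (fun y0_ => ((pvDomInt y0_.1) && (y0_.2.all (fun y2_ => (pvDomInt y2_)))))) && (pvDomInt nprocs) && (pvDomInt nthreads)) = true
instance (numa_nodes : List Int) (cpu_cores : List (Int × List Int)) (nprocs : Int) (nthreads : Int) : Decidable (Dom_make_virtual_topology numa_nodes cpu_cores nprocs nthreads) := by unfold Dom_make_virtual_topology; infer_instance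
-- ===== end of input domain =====

-- B computes each proc's topology directly from its own task range, replacing A's global
-- task arrays and scatter/gather dicts; objective: simpler (no speed claim).

-- ===== PORT A =====
def make_virtual_topology (numa_nodes : List Int) (cpu_cores : List (Int × List Int)) (nprocs : Int) (nthreads : Int) : List (List (Int × List Int)) :=
  let d := PySem.Dict.ofList cpu_cores
  let tasks := PySem.List.pyRange 0 (nprocs * nthreads)
  let task_to_proc := tasks.map (fun t => PySem.Int.floordiv t nthreads)
  let cores := numa_nodes.foldl (fun acc n => acc ++ d.getD n []) []
  let task_to_core := tasks.map (fun t => PySem.List.pyGetD cores (PySem.Int.mod t (PySem.List.len cores)) 0)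
  let core_to_numa_node := d.items.foldl (fun m kv => kv.2.foldl (fun m c => m.insert c kv.1) m) (PySem.Dict.empty : PySem.Dict Int Int)
  let proc_numa_nodes := (PySem.List.pyRange 0 nprocs).foldl (fun m p => m.insert p ([] : List Int)) PySem.Dict.empty
  let proc_cores := (PySem.List.pyRange 0 nprocs).foldl (fun m p => m.insert p ([] : List Int)) PySem.Dict.empty
  let scat := tasks.foldl (fun (st : PySem.Dict Int (List Int) × PySem.Dict Int (List Int)) t =>
      (st.1.modify (PySem.List.pyGetD task_to_proc t 0) []
         (fun l => l ++ [core_to_numa_node.getD (PySem.List.pyGetD task_to_core t 0) 0]),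
       st.2.modify (PySem.List.pyGetD task_to_proc t 0) []
         (fun l => l ++ [PySem.List.pyGetD task_to_core t 0])))
    (proc_numa_nodes, proc_cores)
  (PySem.List.pyRange 0 nprocs).foldl (fun result p =>
      let my_numa_nodes := PySem.List.sorted (PySem.Set.ofList (scat.1.getD p [])) (fun x => x)
      let my_cores := PySem.List.sorted (scat.2.getD p []) (fun x => x)
      let my_topo0 := my_numa_nodes.foldl (fun m n => m.insert n ([] : List Int)) PySem.Dict.empty
      let my_topo1 := my_cores.foldl (fun m c => m.modify (core_to_numa_node.getD c 0) [] (fun l => l ++ [c])) my_topo0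
      let my_topo2 := my_topo1.items.foldl (fun m kv => m.insert kv.1 (PySem.List.sorted (PySem.Set.ofList kv.2) (fun x => x))) my_topo1
      result ++ [my_numa_nodes.map (fun n => (n, my_topo2.getD n []))]) []

-- ===== PORT B =====
def make_virtual_topology_alt (numa_nodes : List Int) (cpu_cores : List (Int × List Int)) (nprocs : Int) (nthreads : Int) : List (List (Int × List Int)) :=
  let d := PySem.Dict.ofList cpu_cores
  let cores := numa_nodes.flatMap (fun n => d.getD n [])
  let core_to_numa := d.items.foldl (fun m kv => kv.2.foldl (fun m c => m.insert c kv.1) m) (PySem.Dict.empty : PySem.Dict Int Int)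
  (PySem.List.pyRange 0 nprocs).map (fun p =>
    let topo := (PySem.List.pyRange (p * nthreads) ((p + 1) * nthreads)).foldl
      (fun (m : PySem.Dict Int (PySem.Set Int)) t =>
        let c := PySem.List.pyGetD cores (PySem.Int.mod t (PySem.List.len cores)) 0
        m.modify (core_to_numa.getD c 0) PySem.Set.empty (fun s => PySem.Set.add s c))
      PySem.Dict.empty
    (PySem.List.sorted topo.keys (fun x => x)).map
      (fun n => (n, PySem.List.sorted (topo.getD n PySem.Set.empty) (fun x => x))))

-- ===== PRECONDITION & SPEC =====
-- Pre_ excludes exactly the inputs on which the Python A raises: a numa node id missing from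
-- cpu_cores (KeyError), and a non-empty task set with either no cores (ZeroDivisionError) or
-- nthreads ≤ 0 (KeyError on a task's proc id outside range(nprocs)).
def Pre_make_virtual_topology (numa_nodes : List Int) (cpu_cores : List (Int × List Int)) (nprocs : Int) (nthreads : Int) : Prop :=
  (∀ n ∈ numa_nodes, (PySem.Dict.ofList cpu_cores).contains n = true) ∧
  (0 < nprocs * nthreads → 0 < nthreads ∧ ∃ n ∈ numa_nodes, (PySem.Dict.ofList cpu_cores).getD n [] ≠ [])
instance (numa_nodes : List Int) (cpu_cores : List (Int × List Int)) (nprocs : Int) (nthreads : Int) : Decidable (Pre_make_virtual_topology numa_nodes cpu_cores nprocs nthreads) := by unfold Pre_make_virtual_topology; infer_instance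
def pvWitness_make_virtual_topology : List Int × (List (Int × List Int)) × Int × Int := ([0], [(0, [0, 1])], 2, 1)

def Spec_make_virtual_topology (numa_nodes : List Int) (cpu_cores : List (Int × List Int)) (nprocs : Int) (nthreads : Int) (out : List (List (Int × List Int))) : Prop := out = make_virtual_topology_alt numa_nodes cpu_cores nprocs nthreads
instance (numa_nodes : List Int) (cpu_cores : List (Int × List Int)) (nprocs : Int) (nthreads : Int) (out : List (List (Int × List Int))) : Decidable (Spec_make_virtual_topology numa_nodes cpu_cores nprocs nthreads out) := by unfold Spec_make_virtual_topology; infer_instance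

-- ===== CLAIM (what is proved, stated in full; the proofs are below) =====
def Claim_equal_make_virtual_topology : Prop := ∀ (numa_nodes : List Int) (cpu_cores : List (Int × List Int)) (nprocs : Int) (nthreads : Int), Dom_make_virtual_topology numa_nodes cpu_cores nprocs nthreads → Pre_make_virtual_topology numa_nodes cpu_cores nprocs nthreads → Spec_make_virtual_topology numa_nodes cpu_cores nprocs nthreads (make_virtual_topology numa_nodes cpu_cores nprocs nthreads)
-- ===== LEMMAS AND PROOFS =====

-- canonical "sorted(list(set(xs)))"
def pvCanon (xs : List Int) : List Int := PySem.List.sorted (PySem.Set.ofList xs) (fun x => x)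
def pvCore (cores : List Int) (t : Int) : Int := PySem.List.pyGetD cores (PySem.Int.mod t (PySem.List.len cores)) 0
def pvEntry (cores : List Int) (c2n : PySem.Dict Int Int) (nthreads p : Int) : List (Int × List Int) :=
  let S := (PySem.List.pyRange (p * nthreads) ((p + 1) * nthreads)).map (pvCore cores)
  (pvCanon (S.map (fun c => c2n.getD c 0))).map
    (fun n => (n, pvCanon (S.filter (fun c => c2n.getD c 0 == n))))

lemma pvGetD_nil (l : List Int) (d : PySem.Dict Int (List Int)) (p : Int) (h : d.getD p [] = []) :
    ((l.foldl (fun m q => m.insert q ([] : List Int)) d).getD p []) = [] := by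
  induction l generalizing d with
  | nil => exact h
  | cons x xs ih => exact ih _ (by rw [PySem.Dict.getD_insert]; split <;> simp [h])

lemma pvGetD_group_add (l : List Int) (f : Int → Int) (d : PySem.Dict Int (List Int)) (n : Int) :
    (l.foldl (fun m c => m.modify (f c) [] (fun s => PySem.Set.add s c)) d).getD n []
      = PySem.Set.update (d.getD n []) (l.filter (fun c => f c == n)) := by
  induction l generalizing d with
  | nil => simp [PySem.Set.update_nil]
  | cons c cs ih =>
    simp only [List.foldl_cons, List.filter_cons]
    by_cases hc : f c = n
    · rw [ih]
      simp [hc, PySem.Set.update_cons]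
    · rw [ih]
      simp [hc, PySem.Dict.getD_modify]
      rw [if_neg (by exact fun h => hc h.symm)]

lemma pvGetD_insertfold_not_mem (l : List (Int × List Int)) (d : PySem.Dict Int (List Int))
    (g : List Int → List Int) (n : Int) (h : n ∉ l.map (·.1)) :
    (l.foldl (fun m kv => m.insert kv.1 (g kv.2)) d).getD n [] = d.getD n [] := by
  induction l generalizing d with
  | nil => rfl
  | cons kv tl ih =>
    simp only [List.map_cons, List.mem_cons, not_or] at h
    rw [List.foldl_cons, ih _ h.2, PySem.Dict.getD_insert, if_neg h.1]

lemma pvGetD_insertfold_mem (l : List (Int × List Int)) (d : PySem.Dict Int (List Int))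
    (g : List Int → List Int) (n : Int) (v : List Int)
    (hnd : (l.map (·.1)).Nodup) (hv : (n, v) ∈ l) :
    (l.foldl (fun m kv => m.insert kv.1 (g kv.2)) d).getD n [] = g v := by
  induction l generalizing d with
  | nil => cases hv
  | cons kv tl ih =>
    rw [List.foldl_cons]
    rcases List.mem_cons.1 hv with h | h
    · subst h
      have hn : n ∉ tl.map (·.1) := by
        simpa using (List.nodup_cons.1 hnd).1
      rw [pvGetD_insertfold_not_mem _ _ _ _ hn, PySem.Dict.getD_insert, if_pos rfl]
    · exact ih _ ((List.nodup_cons.1 hnd).2) h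

lemma pvFilter_range (N a b : Int) (q : Int → Bool) (h0 : 0 ≤ a) (hab : a ≤ b) (hbN : b ≤ N)
    (hq : ∀ t : Int, 0 ≤ t → t < N → (q t = true ↔ a ≤ t ∧ t < b)) :
    (PySem.List.pyRange 0 N).filter q = PySem.List.pyRange a b := by
  rw [PySem.List.pyRange_one_append 0 a N h0 (le_trans hab hbN),
      PySem.List.pyRange_one_append a b N hab hbN, List.filter_append, List.filter_append]
  have e1 : (PySem.List.pyRange 0 a).filter q = [] := by
    apply List.filter_eq_nil_iff.2
    intro t ht
    rw [PySem.List.mem_pyRange_one] at ht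
    intro hqt
    have := (hq t ht.1 (by omega)).1 hqt
    omega
  have e2 : (PySem.List.pyRange a b).filter q = PySem.List.pyRange a b := by
    apply List.filter_eq_self.2
    intro t ht
    rw [PySem.List.mem_pyRange_one] at ht
    exact (hq t (by omega) (by omega)).2 ⟨ht.1, ht.2⟩
  have e3 : (PySem.List.pyRange b N).filter q = [] := by
    apply List.filter_eq_nil_iff.2
    intro t ht
    rw [PySem.List.mem_pyRange_one] at ht
    intro hqt
    have := (hq t (by omega) ht.2).1 hqt
    omega
  rw [e1, e2, e3, List.nil_append, List.append_nil]

lemma pvCanon_congr (xs ys : List Int) (h : ∀ x, x ∈ xs ↔ x ∈ ys) : pvCanon xs = pvCanon ys := by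
  unfold pvCanon
  apply PySem.List.sorted_eq_of_perm_of_pairwise_lt
  · refine List.Perm.trans (PySem.List.sorted_perm _ _ _) ?_
    rw [List.perm_ext_iff_of_nodup (PySem.Set.nodup_ofList _) (PySem.Set.nodup_ofList _)]
    intro x
    rw [PySem.Set.mem_ofList, PySem.Set.mem_ofList]
    exact (h x).symm
  · exact PySem.List.sorted_ofList_pairwise_lt _

lemma pvScat_eq (np nt : Int) (val : Int → Int) (d0 : PySem.Dict Int (List Int))
    (hnp : 0 < np) (hnt : 0 < nt) (p : Int) (hp0 : 0 ≤ p) (hpn : p < np)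
    (hd0 : d0.getD p [] = []) :
    ((PySem.List.pyRange 0 (np * nt)).foldl
        (fun m t => m.modify
            (PySem.List.pyGetD ((PySem.List.pyRange 0 (np * nt)).map (fun t => PySem.Int.floordiv t nt)) t 0)
            [] (fun l => l ++ [val t])) d0).getD p []
      = (PySem.List.pyRange (p * nt) ((p + 1) * nt)).map val := by
  have hN : 0 ≤ np * nt := le_of_lt (mul_pos hnp hnt)
  have hstep : ∀ (m : PySem.Dict Int (List Int)), ∀ t ∈ PySem.List.pyRange 0 (np * nt),
      (m.modify (PySem.List.pyGetD ((PySem.List.pyRange 0 (np * nt)).map (fun t => PySem.Int.floordiv t nt)) t 0)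
        [] (fun l => l ++ [val t]))
      = (m.modify (PySem.Int.floordiv t nt) [] (fun l => l ++ [val t])) := by
    intro m t ht
    rw [PySem.List.mem_pyRange_one] at ht
    have hcast : PySem.List.pyGetD ((PySem.List.pyRange 0 (np * nt)).map (fun t => PySem.Int.floordiv t nt)) t 0
        = PySem.Int.floordiv t nt := by
      have h1 := PySem.List.pyGetD_map_pyRange (fun t => PySem.Int.floordiv t nt) (np * nt).toNat t.toNat 0
        (by omega)
      rw [Int.toNat_of_nonneg hN, Int.toNat_of_nonneg ht.1] at h1
      exact h1
    rw [hcast]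
  rw [PySem.List.foldl_congr_mem _ _ _ _ hstep]
  rw [← List.foldl_map (f := fun t => (PySem.Int.floordiv t nt, val t))
      (g := fun (m : PySem.Dict Int (List Int)) pr => m.modify pr.1 [] (fun l => l ++ [pr.2]))]
  rw [PySem.Dict.getD_foldl_modify_append, hd0, List.nil_append]
  rw [List.filter_map, List.map_map]
  have hfilter : (PySem.List.pyRange 0 (np * nt)).filter
      ((fun (pr : Int × Int) => pr.1 == p) ∘ (fun t => (PySem.Int.floordiv t nt, val t)))
      = PySem.List.pyRange (p * nt) ((p + 1) * nt) := by
    apply pvFilter_range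
    · exact mul_nonneg hp0 (le_of_lt hnt)
    · nlinarith
    · have : p + 1 ≤ np := by omega
      exact mul_le_mul_of_nonneg_right this (le_of_lt hnt)
    · intro t _ _
      simp only [Function.comp_apply, beq_iff_eq]
      exact PySem.Int.floordiv_eq_iff_of_pos hnt
  rw [hfilter]
  rfl

lemma pvInner (c2n : PySem.Dict Int Int) (S : List Int) :
    (PySem.List.sorted (PySem.Set.ofList (S.map (fun c => c2n.getD c 0))) (fun x => x)).map
      (fun n => (n,
        (((PySem.List.sorted S (fun x => x)).foldl
              (fun m c => m.modify (c2n.getD c 0) [] (fun l => l ++ [c]))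
              ((PySem.List.sorted (PySem.Set.ofList (S.map (fun c => c2n.getD c 0))) (fun x => x)).foldl
                (fun m n => m.insert n ([] : List Int)) PySem.Dict.empty)).items.foldl
            (fun m kv => m.insert kv.1 (PySem.List.sorted (PySem.Set.ofList kv.2) (fun x => x)))
            ((PySem.List.sorted S (fun x => x)).foldl
              (fun m c => m.modify (c2n.getD c 0) [] (fun l => l ++ [c]))
              ((PySem.List.sorted (PySem.Set.ofList (S.map (fun c => c2n.getD c 0))) (fun x => x)).foldl
                (fun m n => m.insert n ([] : List Int)) PySem.Dict.empty))).getD n []))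
    = (pvCanon (S.map (fun c => c2n.getD c 0))).map
        (fun n => (n, pvCanon (S.filter (fun c => c2n.getD c 0 == n)))) := by
  set key : Int → Int := fun c => c2n.getD c 0 with hkey
  set my_numa := PySem.List.sorted (PySem.Set.ofList (S.map key)) (fun x => x) with hmn
  set my_cores := PySem.List.sorted S (fun x => x) with hmc
  set t0 := my_numa.foldl (fun m n => m.insert n ([] : List Int)) PySem.Dict.empty with ht0
  set t1 := my_cores.foldl (fun m c => m.modify (key c) [] (fun l => l ++ [c])) t0 with ht1
  have hmnNd : my_numa.Nodup :=
    (PySem.List.sorted_perm _ _ _).symm.nodup (PySem.Set.nodup_ofList _)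
  have hmem_numa : ∀ c ∈ my_cores, key c ∈ my_numa := by
    intro c hc
    rw [hmc, PySem.List.mem_sorted] at hc
    rw [hmn, PySem.List.mem_sorted, PySem.Set.mem_ofList]
    exact List.mem_map_of_mem hc
  have ht0keys : t0.keys = my_numa := by
    rw [ht0, PySem.Dict.keys_foldl_insert my_numa (fun _ _ => []) PySem.Dict.empty,
        PySem.Dict.keys_empty, PySem.Set.update_nil_left]
    exact PySem.Set.ofList_eq_self_of_nodup _ hmnNd
  have ht1keys : t1.keys = my_numa := by
    rw [ht1, PySem.Dict.keys_foldl_modify_key my_cores key [] (fun _ c l => l ++ [c]) t0, ht0keys,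
        PySem.Set.update_eq_append_filter]
    have : (PySem.Set.ofList (my_cores.map key)).filter (fun y => !(PySem.Set.contains my_numa y)) = [] := by
      apply List.filter_eq_nil_iff.2
      intro x hx
      rw [PySem.Set.mem_ofList] at hx
      obtain ⟨c, hc, rfl⟩ := List.mem_map.1 hx
      simp [hmem_numa c hc]
    rw [this, List.append_nil]
  have ht1get : ∀ n : Int, t1.getD n [] = my_cores.filter (fun c => key c == n) := by
    intro n
    rw [ht1, ← List.foldl_map (f := fun c => (key c, c))
        (g := fun (m : PySem.Dict Int (List Int)) pr => m.modify pr.1 [] (fun l => l ++ [pr.2]))]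
    rw [PySem.Dict.getD_foldl_modify_append]
    rw [pvGetD_nil _ _ _ (PySem.Dict.getD_empty _ _), List.nil_append, List.filter_map, List.map_map]
    simp [Function.comp_def]
  have ht1nd : t1.keys.Nodup := by rw [ht1keys]; exact hmnNd
  apply List.map_congr_left
  intro n hn
  have hitems : t1.items = my_numa.map (fun k => (k, t1.getD k [])) := by
    rw [PySem.Dict.items_eq_map_keys t1 ht1nd [], ht1keys]
  have hfst : (t1.items.map (·.1)).Nodup := by
    rw [hitems, List.map_map]
    simpa [Function.comp_def] using hmnNd
  have hmem_items : (n, t1.getD n []) ∈ t1.items := by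
    rw [hitems]
    exact List.mem_map_of_mem hn
  rw [pvGetD_insertfold_mem t1.items t1
      (fun v => PySem.List.sorted (PySem.Set.ofList v) (fun x => x)) n (t1.getD n []) hfst hmem_items]
  rw [ht1get n]
  congr 1
  show pvCanon (my_cores.filter (fun c => key c == n)) = pvCanon (S.filter (fun c => key c == n))
  apply pvCanon_congr
  intro x
  simp only [List.mem_filter, hmc, PySem.List.mem_sorted]

lemma pvAlt_eq (numa_nodes : List Int) (cpu_cores : List (Int × List Int)) (nprocs nthreads : Int) :
    make_virtual_topology_alt numa_nodes cpu_cores nprocs nthreads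
      = (PySem.List.pyRange 0 nprocs).map
          (pvEntry (numa_nodes.flatMap (fun n => (PySem.Dict.ofList cpu_cores).getD n []))
            ((PySem.Dict.ofList cpu_cores).items.foldl
              (fun m kv => kv.2.foldl (fun m c => m.insert c kv.1) m) PySem.Dict.empty)
            nthreads) := by
  unfold make_virtual_topology_alt
  apply List.map_congr_left
  intro p _
  set cores := numa_nodes.flatMap (fun n => (PySem.Dict.ofList cpu_cores).getD n []) with hcores
  set c2n := (PySem.Dict.ofList cpu_cores).items.foldl
      (fun m kv => kv.2.foldl (fun m c => m.insert c kv.1) m) (PySem.Dict.empty : PySem.Dict Int Int) with hc2n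
  show _ = pvEntry cores c2n nthreads p
  unfold pvEntry pvCanon pvCore
  dsimp only
  rw [← List.foldl_map (f := fun t => PySem.List.pyGetD cores (PySem.Int.mod t (PySem.List.len cores)) 0)
      (g := fun (m : PySem.Dict Int (PySem.Set Int)) c => m.modify (c2n.getD c 0) PySem.Set.empty (fun s => PySem.Set.add s c))]
  set S := (PySem.List.pyRange (p * nthreads) ((p + 1) * nthreads)).map
      (fun t => PySem.List.pyGetD cores (PySem.Int.mod t (PySem.List.len cores)) 0) with hS
  have hkeys : (S.foldl (fun (m : PySem.Dict Int (PySem.Set Int)) c =>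
      m.modify (c2n.getD c 0) PySem.Set.empty (fun s => PySem.Set.add s c)) PySem.Dict.empty).keys
      = PySem.Set.ofList (S.map (fun c => c2n.getD c 0)) := by
    rw [PySem.Dict.keys_foldl_modify_key S (fun c => c2n.getD c 0) PySem.Set.empty
        (fun _ c s => PySem.Set.add s c) PySem.Dict.empty]
    rw [PySem.Dict.keys_empty, PySem.Set.update_nil_left]
  have hget : ∀ n : Int, (S.foldl (fun (m : PySem.Dict Int (PySem.Set Int)) c =>
      m.modify (c2n.getD c 0) PySem.Set.empty (fun s => PySem.Set.add s c)) PySem.Dict.empty).getD n PySem.Set.empty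
      = PySem.Set.ofList (S.filter (fun c => c2n.getD c 0 == n)) := by
    intro n
    have := pvGetD_group_add S (fun c => c2n.getD c 0) PySem.Dict.empty n
    simpa [PySem.Dict.getD_empty, PySem.Set.update_nil_left] using this
  rw [hkeys]
  apply List.map_congr_left
  intro n _
  rw [hget n]

-- ===== VERDICT (by name: the statement is the Claim_ definition above) =====
theorem make_virtual_topology_spec : Claim_equal_make_virtual_topology := by
  intro nn cc np nt _ _
  unfold Spec_make_virtual_topology
  rw [pvAlt_eq]
  simp only [make_virtual_topology]
  rw [PySem.List.foldl_append_eq_flatMap (fun n => (PySem.Dict.ofList cc).getD n []) nn []]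
  rw [List.nil_append]
  set cores := nn.flatMap (fun n => (PySem.Dict.ofList cc).getD n []) with hcores
  set c2n := (PySem.Dict.ofList cc).items.foldl
      (fun m kv => kv.2.foldl (fun m c => m.insert c kv.1) m) (PySem.Dict.empty : PySem.Dict Int Int) with hc2n
  set proc0 := (PySem.List.pyRange 0 np).foldl (fun m p => m.insert p ([] : List Int)) PySem.Dict.empty with hproc0
  rw [PySem.List.foldl_append_singleton_eq_map, List.nil_append]
  apply List.map_congr_left
  intro p hp
  rw [PySem.List.mem_pyRange_one] at hp
  have hproc0get : proc0.getD p [] = [] := pvGetD_nil _ _ _ (PySem.Dict.getD_empty _ _)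
  rw [PySem.List.foldl_prod_mk
      (f := fun (m : PySem.Dict Int (List Int)) t => m.modify
          (PySem.List.pyGetD ((PySem.List.pyRange 0 (np * nt)).map (fun t => PySem.Int.floordiv t nt)) t 0) []
          (fun l => l ++ [c2n.getD (PySem.List.pyGetD ((PySem.List.pyRange 0 (np * nt)).map
              (fun t => PySem.List.pyGetD cores (PySem.Int.mod t (PySem.List.len cores)) 0)) t 0) 0]))
      (g := fun (m : PySem.Dict Int (List Int)) t => m.modify
          (PySem.List.pyGetD ((PySem.List.pyRange 0 (np * nt)).map (fun t => PySem.Int.floordiv t nt)) t 0) []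
          (fun l => l ++ [PySem.List.pyGetD ((PySem.List.pyRange 0 (np * nt)).map
              (fun t => PySem.List.pyGetD cores (PySem.Int.mod t (PySem.List.len cores)) 0)) t 0]))]
  dsimp only
  by_cases hnt : 0 < nt
  · -- main case: non-empty task blocks
    have hN : 0 ≤ np * nt := le_of_lt (mul_pos (by omega) hnt)
    have hblock : ∀ t ∈ PySem.List.pyRange (p * nt) ((p + 1) * nt), 0 ≤ t ∧ t < np * nt := by
      intro t ht
      rw [PySem.List.mem_pyRange_one] at ht
      constructor
      · have : 0 ≤ p * nt := mul_nonneg hp.1 (le_of_lt hnt)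
        omega
      · have : (p + 1) * nt ≤ np * nt :=
          mul_le_mul_of_nonneg_right (by omega) (le_of_lt hnt)
        omega
    have hcoreAt : ∀ t : Int, 0 ≤ t → t < np * nt →
        PySem.List.pyGetD ((PySem.List.pyRange 0 (np * nt)).map
          (fun t => PySem.List.pyGetD cores (PySem.Int.mod t (PySem.List.len cores)) 0)) t 0
        = pvCore cores t := by
      intro t h0 hlt
      have h1 := PySem.List.pyGetD_map_pyRange
        (fun t => PySem.List.pyGetD cores (PySem.Int.mod t (PySem.List.len cores)) 0)
        (np * nt).toNat t.toNat 0 (by omega)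
      rw [Int.toNat_of_nonneg hN, Int.toNat_of_nonneg h0] at h1
      rw [h1, pvCore]
    rw [pvScat_eq np nt _ proc0 (by omega) hnt p hp.1 hp.2 hproc0get,
        pvScat_eq np nt _ proc0 (by omega) hnt p hp.1 hp.2 hproc0get]
    rw [List.map_congr_left (fun t ht => by
          rw [hcoreAt t (hblock t ht).1 (hblock t ht).2] :
        ∀ t ∈ PySem.List.pyRange (p * nt) ((p + 1) * nt),
          (c2n.getD (PySem.List.pyGetD ((PySem.List.pyRange 0 (np * nt)).map
            (fun t => PySem.List.pyGetD cores (PySem.Int.mod t (PySem.List.len cores)) 0)) t 0) 0)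
          = c2n.getD (pvCore cores t) 0),
        List.map_congr_left (fun t ht => by
          rw [hcoreAt t (hblock t ht).1 (hblock t ht).2] :
        ∀ t ∈ PySem.List.pyRange (p * nt) ((p + 1) * nt),
          (PySem.List.pyGetD ((PySem.List.pyRange 0 (np * nt)).map
            (fun t => PySem.List.pyGetD cores (PySem.Int.mod t (PySem.List.len cores)) 0)) t 0)
          = pvCore cores t)]
    rw [show (PySem.List.pyRange (p * nt) ((p + 1) * nt)).map (fun t => c2n.getD (pvCore cores t) 0)
        = ((PySem.List.pyRange (p * nt) ((p + 1) * nt)).map (pvCore cores)).map (fun c => c2n.getD c 0) by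
      rw [List.map_map]
      rfl]
    unfold pvEntry
    dsimp only
    exact pvInner c2n ((PySem.List.pyRange (p * nt) ((p + 1) * nt)).map (pvCore cores))
  · -- nthreads ≤ 0: every task block is empty
    have htasks : PySem.List.pyRange 0 (np * nt) = [] := by
      apply PySem.List.pyRange_one_eq_nil
      have : np * nt ≤ 0 := mul_nonpos_of_nonneg_of_nonpos (by omega) (by omega)
      omega
    have hblock : PySem.List.pyRange (p * nt) ((p + 1) * nt) = [] := by
      apply PySem.List.pyRange_one_eq_nil
      nlinarith [hp.1]
    rw [htasks]
    simp only [List.foldl_nil]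
    rw [hproc0get]
    unfold pvEntry
    rw [hblock]
    dsimp only [List.map_nil]
    exact pvInner c2n []
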